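-- pv_equiv track=rewrite | github.com/gkthiruvathukal/music246-abjad | src/bird_im_migration_ensemble/score.py | _split_duration_units
-- ===== SOURCE A (Python) =====
-- def _split_duration_units(total_units: int, measure_units: int) -> list[int]:
--     values = []
--     power = 1
--     while power <= max(16, measure_units):
--         values.append(power)
--         power *= 2
--     values.sort(reverse=True)
--
--     result: list[int] = []
--     remaining = total_units
--     for value in values:
--         while remaining >= value:
--             result.append(value)
--             remaining -= value
--     if remaining:
--         raise ValueError(f"Could not split {total_units} sixteenth units.")
--     return result
-- ===== SOURCE B (Python) =====
-- def _split_duration_units(total_units: int, measure_units: int) -> list[int]: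
--     if total_units < 0:
--         raise ValueError(f"Could not split {total_units} sixteenth units.")
--     cap = 1 << (max(16, measure_units).bit_length() - 1)
--
--     def rec(n: int, c: int) -> list[int]:
--         # decomposition of n into powers of two capped at c, largest first
--         if c == 1:
--             return [1] * n
--         res = [2 * x for x in rec(n >> 1, c >> 1)]
--         if n & 1:
--             res.append(1)
--         return res
--
--     return rec(total_units, cap)
-- ===== Notes on version B (the rewrite author's own statement) =====
-- stated objective: alternative
-- what changed: Replaces A's build-ascending-powers/sort/nested greedy subtract-loops with a divide-and-conquer recursion: recurse on n>>1 with the cap halved, double every piece of the sub-result and append a 1 when n is odd; no descending scan and no subtraction/division by the cap occurs.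
import Mathlib
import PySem

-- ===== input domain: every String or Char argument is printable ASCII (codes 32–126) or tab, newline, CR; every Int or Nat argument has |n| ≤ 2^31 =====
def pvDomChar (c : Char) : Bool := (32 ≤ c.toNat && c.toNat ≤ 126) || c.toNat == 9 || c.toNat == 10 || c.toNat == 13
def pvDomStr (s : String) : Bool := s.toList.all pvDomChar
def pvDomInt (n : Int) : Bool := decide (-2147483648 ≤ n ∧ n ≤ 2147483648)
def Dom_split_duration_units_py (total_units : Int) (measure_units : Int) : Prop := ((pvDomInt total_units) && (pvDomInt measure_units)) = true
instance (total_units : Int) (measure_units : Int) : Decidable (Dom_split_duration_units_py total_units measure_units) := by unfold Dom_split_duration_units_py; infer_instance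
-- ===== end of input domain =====

-- B replaces A's build/sort/nested-subtract greedy with a divide-and-conquer recursion
-- (recurse on n >> 1 with the cap halved, double the pieces, append 1 when n is odd)
-- (objective: alternative). Both raise ValueError exactly when total_units < 0 (excluded by Pre_).

-- ===== PORT A =====
-- while power <= max(16, measure_units): values.append(power); power *= 2   (fuel 64 covers the domain)
def pvBuildValues (fuel : Nat) (M power : Int) (values : List Int) : List Int :=
  match fuel with
  | 0 => values
  | f + 1 => if power ≤ M then pvBuildValues f M (power * 2) (values ++ [power]) else values

-- while remaining >= value: result.append(value); remaining -= value   (fuel = remaining.toNat + 1 suffices: value ≥ 1)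
def pvTakeAll (fuel : Nat) (value remaining : Int) (result : List Int) : List Int × Int :=
  match fuel with
  | 0 => (result, remaining)
  | f + 1 =>
    if value ≤ remaining then pvTakeAll f value (remaining - value) (result ++ [value])
    else (result, remaining)

-- for value in values: while remaining >= value: …
def pvGreedy (values : List Int) (remaining : Int) (result : List Int) : List Int × Int :=
  match values with
  | [] => (result, remaining)
  | v :: vs =>
      match pvTakeAll (remaining.toNat + 1) v remaining result with
      | (result1, remaining1) => pvGreedy vs remaining1 result1

def split_duration_units_py (total_units : Int) (measure_units : Int) : List Int :=
  (pvGreedy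
    (PySem.List.sorted (pvBuildValues 64 (max 16 measure_units) 1 []) (fun x => x) true)
    total_units []).1
  -- the trailing 'if remaining: raise ValueError' fires exactly when total_units < 0 (outside Pre_)

-- ===== PORT B =====
-- def rec(n, c): if c == 1: return [1]*n; res = [2*x for x in rec(n >> 1, c >> 1)]; if n & 1: res.append(1); return res
-- the cap argument c is carried as its exponent k (c = 2^k, so 'c == 1' is 'k = 0' and 'c >> 1' is 'k - 1');
-- n >> 1 = n // 2 and n & 1 = n % 2 exactly, for every Python int (two's-complement shift/mask)
def pvRec : Nat → Int → List Int
  | 0, n => List.replicate n.toNat 1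
  | k + 1, n =>
      (pvRec k (PySem.Int.floordiv n 2)).map (fun x => 2 * x) ++
        (if PySem.Int.mod n 2 = 1 then [1] else [])

-- cap = 1 << (max(16, measure_units).bit_length() - 1): its exponent is bit_length - 1 = Nat.log2
def split_duration_units_py_alt (total_units : Int) (measure_units : Int) : List Int :=
  if total_units < 0 then []  -- B raises ValueError here; excluded by Pre_
  else pvRec (Nat.log2 (max 16 measure_units).toNat) total_units

-- ===== PRECONDITION & SPEC =====
-- Pre_ excludes exactly total_units < 0, where both A and B raise ValueError.
def Pre_split_duration_units_py (total_units : Int) (measure_units : Int) : Prop :=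
  0 ≤ total_units
instance (total_units : Int) (measure_units : Int) : Decidable (Pre_split_duration_units_py total_units measure_units) := by unfold Pre_split_duration_units_py; infer_instance

def pvWitness_split_duration_units_py : Int × Int := (23, 20)

def Spec_split_duration_units_py (total_units : Int) (measure_units : Int) (out : List Int) : Prop := out = split_duration_units_py_alt total_units measure_units
instance (total_units : Int) (measure_units : Int) (out : List Int) : Decidable (Spec_split_duration_units_py total_units measure_units out) := by unfold Spec_split_duration_units_py; infer_instance

-- ===== CLAIM (what is proved, stated in full; the proofs are below) =====
def Claim_equal_split_duration_units_py : Prop := ∀ (total_units : Int) (measure_units : Int), Dom_split_duration_units_py total_units measure_units → Pre_split_duration_units_py total_units measure_units → Spec_split_duration_units_py total_units measure_units (split_duration_units_py total_units measure_units)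

-- ===== LEMMAS AND PROOFS =====

-- descending powers [2^(n-1), …, 2, 1]
def descPow : Nat → List Int
  | 0 => []
  | n + 1 => (2 ^ n : Int) :: descPow n

-- ascending powers [2^j, …, 2^(j+n-1)]
def ascPow : Nat → Nat → List Int
  | _, 0 => []
  | j, n + 1 => (2 ^ j : Int) :: ascPow (j + 1) n

-- the common decomposition: (r / 2^n) copies of 2^n, then recurse on the remainder
def bdec : Nat → Int → List Int
  | 0, _ => []
  | n + 1, r => List.replicate ((r / 2 ^ n).toNat) (2 ^ n : Int) ++ bdec n (r % 2 ^ n)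

-- final remainder of A's greedy loop
def brem : Nat → Int → Int
  | 0, r => r
  | n + 1, r => brem n (r % 2 ^ n)

lemma ascPow_snoc (n : Nat) : ∀ j, ascPow j (n + 1) = ascPow j n ++ [(2 : Int) ^ (j + n)] := by
  induction n with
  | zero => intro j; simp [ascPow]
  | succ n ih =>
    intro j
    rw [ascPow, ih (j + 1), ascPow]
    simp [Nat.add_comm, Nat.add_left_comm]

lemma descPow_reverse (n : Nat) : (descPow n).reverse = ascPow 0 n := by
  induction n with
  | zero => rfl
  | succ n ih =>
    rw [descPow, List.reverse_cons, ih, ascPow_snoc]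
    simp

lemma pvTakeAll_spec (fuel : Nat) (v r : Int) (res : List Int)
    (hv : 1 ≤ v) (hr : 0 ≤ r) (hfuel : r.toNat < fuel) :
    pvTakeAll fuel v r res = (res ++ List.replicate ((r / v).toNat) v, r % v) := by
  induction fuel generalizing r res with
  | zero => omega
  | succ f ih =>
    rw [pvTakeAll]
    by_cases h : v ≤ r
    · simp only [if_pos h]
      have hrv : (0:Int) ≤ r - v := by omega
      have hfe : (r - v).toNat < f := by omega
      rw [ih (r - v) (res ++ [v]) hrv hfe]
      have hdiv : (r - v) / v = r / v - 1 := by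
        have := Int.add_mul_ediv_right r (-1) (by omega : v ≠ 0)
        simpa [sub_eq_add_neg, neg_mul] using this
      have hq : 1 ≤ r / v := (Int.le_ediv_iff_mul_le (by omega)).mpr (by omega)
      have hmod : (r - v) % v = r % v := Int.sub_emod_right r v
      rw [hdiv, hmod]
      have hrepl : (r / v - 1).toNat + 1 = (r / v).toNat := by omega
      have hstep : List.replicate ((r / v).toNat) v = v :: List.replicate ((r / v - 1).toNat) v := by
        rw [← hrepl]; rfl
      simp [hstep]
    · simp only [if_neg h]
      have hq : r / v = 0 := Int.ediv_eq_zero_of_lt hr (by omega)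
      have hm : r % v = r := Int.emod_eq_of_lt hr (by omega)
      simp [hq, hm]

lemma pvGreedy_descPow (n : Nat) : ∀ (r : Int) (res : List Int), 0 ≤ r →
    pvGreedy (descPow n) r res = (res ++ bdec n r, brem n r) := by
  induction n with
  | zero => intro r res _; simp [descPow, pvGreedy, bdec, brem]
  | succ n ih =>
    intro r res hr
    have hv : (1:Int) ≤ 2 ^ n := one_le_pow₀ (by norm_num)
    have hm : 0 ≤ r % 2 ^ n := Int.emod_nonneg r (by positivity)
    rw [descPow, pvGreedy, pvTakeAll_spec _ _ _ _ hv hr (by omega)]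
    show pvGreedy (descPow n) (r % 2 ^ n)
        (res ++ List.replicate ((r / 2 ^ n).toNat) ((2:Int) ^ n)) = _
    rw [ih _ _ hm, bdec, brem]
    simp [List.append_assoc]

lemma pvBuildValues_eq (M : Int) (k : Nat) (hk : (2:Int) ^ k ≤ M) (hk2 : M < 2 ^ (k + 1)) :
    ∀ (fuel : Nat) (j : Nat) (vals : List Int), j ≤ k → k + 1 - j ≤ fuel →
      pvBuildValues fuel M (2 ^ j) vals = vals ++ ascPow j (k + 1 - j) := by
  intro fuel
  induction fuel with
  | zero => intro j vals hj hf; omega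
  | succ f ih =>
    intro j vals hj hf
    rw [pvBuildValues]
    have hle : (2:Int) ^ j ≤ M := le_trans (pow_le_pow_right₀ (by norm_num) hj) hk
    rw [if_pos hle, show (2:Int) ^ j * 2 = 2 ^ (j + 1) by rw [pow_succ]]
    by_cases hjk : j = k
    · subst hjk
      have hstop : pvBuildValues f M (2 ^ (j + 1)) (vals ++ [2 ^ j]) = vals ++ [2 ^ j] := by
        cases f with
        | zero => rfl
        | succ f' => rw [pvBuildValues, if_neg (by omega)]
      rw [hstop, show j + 1 - j = 1 by omega]
      simp [ascPow]
    · rw [ih (j + 1) (vals ++ [2 ^ j]) (by omega) (by omega)]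
      rw [show k + 1 - j = (k + 1 - (j + 1)) + 1 by omega, ascPow]
      simp

lemma descPow_pairwise_gt (n : Nat) : (descPow n).Pairwise (fun a b => b < a) := by
  induction n with
  | zero => simp [descPow]
  | succ n ih =>
    rw [descPow]
    refine List.Pairwise.cons ?_ ih
    intro b hb
    have hmem : ∀ m b, b ∈ descPow m → b < (2:Int) ^ m := by
      intro m
      induction m with
      | zero => simp [descPow]
      | succ m ihm =>
        intro b hb
        rw [descPow] at hb
        rcases List.mem_cons.mp hb with h | h
        · subst h; exact pow_lt_pow_right₀ (by norm_num) (by omega)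
        · exact lt_trans (ihm b h) (pow_lt_pow_right₀ (by norm_num) (by omega))
    exact hmem n b hb

lemma sorted_asc_eq_descPow (n : Nat) :
    PySem.List.sorted (ascPow 0 n) (fun x => x) true = descPow n := by
  rw [← descPow_reverse]
  exact PySem.List.sorted_rev_eq_of_perm_of_pairwise_gt _ _ _ (List.reverse_perm _).symm
    (descPow_pairwise_gt n)

-- unique quotient/remainder at a doubled modulus
lemma divmod_double (p q w t : Int) (hp : 0 < p) (h : t = 2 * p * q + w)
    (h0 : 0 ≤ w) (h2 : w < 2 * p) : t / (2 * p) = q ∧ t % (2 * p) = w := by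
  constructor
  · rw [h, add_comm, mul_comm (2 * p) q, Int.add_mul_ediv_right _ _ (by omega : 2 * p ≠ 0),
      Int.ediv_eq_zero_of_lt h0 h2]
    ring
  · rw [h, add_comm, mul_comm (2 * p) q, Int.add_mul_emod_self_right,
      Int.emod_eq_of_lt h0 h2]

-- doubling every piece of bdec m r (r < 2^m), then a trailing 1 when b = 1, is bdec (m+1) (2r+b)
lemma bdec_double (m : Nat) : ∀ (r b : Int), 0 ≤ r → r < 2 ^ m → (b = 0 ∨ b = 1) →
    (bdec m r).map (fun x => 2 * x) ++ (if b = 1 then [1] else []) = bdec (m + 1) (2 * r + b) := by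
  induction m with
  | zero =>
    intro r b hr hlt hb
    have hr0 : r = 0 := by omega
    rcases hb with hb | hb <;> subst hb <;> simp [hr0, bdec]
  | succ m ih =>
    intro r b hr hlt hb
    have hp : (0:Int) < 2 ^ m := by positivity
    have hrm0 : 0 ≤ r % 2 ^ m := Int.emod_nonneg r (by omega)
    have hrml : r % 2 ^ m < 2 ^ m := Int.emod_lt_of_pos r hp
    have hqm : r = 2 ^ m * (r / 2 ^ m) + r % 2 ^ m := (Int.ediv_add_emod r (2 ^ m)).symm
    obtain ⟨hq, hm⟩ := divmod_double (2 ^ m) (r / 2 ^ m) (2 * (r % 2 ^ m) + b) (2 * r + b)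
      hp (by rw [mul_assoc]; omega) (by omega) (by omega)
    rw [bdec]
    rw [show bdec (m + 2) (2 * r + b) =
      List.replicate (((2 * r + b) / 2 ^ (m + 1)).toNat) ((2:Int) ^ (m + 1)) ++
        bdec (m + 1) ((2 * r + b) % 2 ^ (m + 1)) from rfl]
    rw [show (2:Int) ^ (m + 1) = 2 * 2 ^ m by ring, hq, hm]
    rw [List.map_append, List.map_replicate, List.append_assoc,
      ih (r % 2 ^ m) b hrm0 hrml hb]

-- B's recursion computes the same decomposition
lemma pvRec_bdec (k : Nat) : ∀ (t : Int), 0 ≤ t → pvRec k t = bdec (k + 1) t := by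
  induction k with
  | zero =>
    intro t ht
    show List.replicate t.toNat 1 = bdec 1 t
    rw [show bdec 1 t = List.replicate ((t / 2 ^ 0).toNat) ((2:Int) ^ 0) ++ bdec 0 (t % 2 ^ 0) from rfl]
    simp [bdec]
  | succ k ih =>
    intro t ht
    have hfd : PySem.Int.floordiv t 2 = t / 2 := PySem.Int.floordiv_eq_ediv_of_pos (by norm_num)
    have hmd : PySem.Int.mod t 2 = t % 2 := PySem.Int.mod_eq_emod_of_pos (by norm_num)
    have hu0 : 0 ≤ t / 2 := Int.ediv_nonneg ht (by norm_num)
    have hb0 : 0 ≤ t % 2 := Int.emod_nonneg t (by norm_num)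
    have hb2 : t % 2 < 2 := Int.emod_lt_of_pos t (by norm_num)
    have hp : (0:Int) < 2 ^ k := by positivity
    have hrm0 : 0 ≤ (t / 2) % 2 ^ k := Int.emod_nonneg _ (by omega)
    have hrml : (t / 2) % 2 ^ k < 2 ^ k := Int.emod_lt_of_pos _ hp
    have hqm : t / 2 = 2 ^ k * ((t / 2) / 2 ^ k) + (t / 2) % 2 ^ k := (Int.ediv_add_emod _ _).symm
    have htd : t = 2 * (t / 2) + t % 2 := by
      have := Int.ediv_add_emod t 2; omega
    obtain ⟨hq, hm⟩ := divmod_double (2 ^ k) ((t / 2) / 2 ^ k)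
      (2 * ((t / 2) % 2 ^ k) + t % 2) t hp (by rw [mul_assoc]; omega) (by omega) (by omega)
    show (pvRec k (PySem.Int.floordiv t 2)).map (fun x => 2 * x) ++
        (if PySem.Int.mod t 2 = 1 then [1] else []) = bdec (k + 2) t
    rw [hfd, hmd, ih (t / 2) hu0]
    rw [show bdec (k + 1) (t / 2) =
      List.replicate (((t / 2) / 2 ^ k).toNat) ((2:Int) ^ k) ++ bdec k ((t / 2) % 2 ^ k) from rfl]
    rw [List.map_append, List.map_replicate, List.append_assoc,
      bdec_double k ((t / 2) % 2 ^ k) (t % 2) hrm0 hrml (by omega)]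
    rw [show bdec (k + 2) t =
      List.replicate ((t / 2 ^ (k + 1)).toNat) ((2:Int) ^ (k + 1)) ++
        bdec (k + 1) (t % 2 ^ (k + 1)) from rfl]
    rw [show (2:Int) ^ (k + 1) = 2 * 2 ^ k by ring, hq, hm]

-- inside Dom, with M = max 16 measure_units and k = Nat.log2 M.toNat: 1 ≤ k ≤ 31, 2^k ≤ M < 2^(k+1)
lemma log2_bounds (M : Int) (h16 : 16 ≤ M) (hub : M ≤ 2147483648) :
    1 ≤ Nat.log2 M.toNat ∧ Nat.log2 M.toNat ≤ 31 ∧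
      (2:Int) ^ Nat.log2 M.toNat ≤ M ∧ M < 2 ^ (Nat.log2 M.toNat + 1) := by
  set t := M.toNat with ht
  have h16' : 16 ≤ t := by omega
  have hub' : t ≤ 2147483648 := by omega
  rw [Nat.log2_eq_log_two]
  have h1 : 2 ^ Nat.log 2 t ≤ t := Nat.pow_log_le_self 2 (by omega)
  have h2 : t < 2 ^ (Nat.log 2 t + 1) := Nat.lt_pow_succ_log_self (by norm_num) t
  refine ⟨?_, ?_, ?_, ?_⟩
  · calc 1 ≤ Nat.log 2 16 := by norm_num [Nat.log]
      _ ≤ Nat.log 2 t := Nat.log_mono_right h16'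
  · calc Nat.log 2 t ≤ Nat.log 2 2147483648 := Nat.log_mono_right hub'
      _ ≤ 31 := by norm_num [Nat.log]
  · have h1' : ((2:Nat) ^ Nat.log 2 t : Int) ≤ (t : Int) := by exact_mod_cast h1
    push_cast at h1' ⊢
    omega
  · have h2' : (t : Int) < ((2:Nat) ^ (Nat.log 2 t + 1) : Int) := by exact_mod_cast h2
    push_cast at h2' ⊢
    omega

-- ===== VERDICT (by name: the statement is the Claim_ definition above) =====
theorem split_duration_units_py_spec : Claim_equal_split_duration_units_py := by
  intro t m hdom hpre
  unfold Spec_split_duration_units_py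
  unfold Dom_split_duration_units_py pvDomInt at hdom
  unfold Pre_split_duration_units_py at hpre
  simp only [Bool.and_eq_true, decide_eq_true_eq] at hdom
  set M := max 16 m with hM
  have h16 : 16 ≤ M := le_max_left _ _
  have hub : M ≤ 2147483648 := by
    have h2 := hdom.2.2
    omega
  obtain ⟨hk1, hk31, hkle, hklt⟩ := log2_bounds M h16 hub
  set k := Nat.log2 M.toNat with hkdef
  have hbuild : pvBuildValues 64 M 1 [] = ascPow 0 (k + 1) := by
    have h := pvBuildValues_eq M k hkle hklt 64 0 [] (by omega) (by omega)
    simpa using h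
  have hA : split_duration_units_py t m = bdec (k + 1) t := by
    unfold split_duration_units_py
    rw [← hM, hbuild, sorted_asc_eq_descPow, pvGreedy_descPow (k + 1) t [] hpre]
    simp
  have hB : split_duration_units_py_alt t m = bdec (k + 1) t := by
    unfold split_duration_units_py_alt
    rw [if_neg (by omega), ← hM, ← hkdef]
    exact pvRec_bdec k t hpre
  rw [hA, hB]
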